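-- pv_equiv track=rewrite | github.com/sbeardsley/tiktok | services/metadata_service.py | extract_tags_from_description
-- ===== SOURCE A (Python) =====
-- from typing import Dict, List
--
-- def extract_tags_from_description(description: str) -> List[str]:
--     """Extract hashtags from description text."""
--     if not description:
--         return []
--
--     tags = []
--     parts = description.split()
--
--     for part in parts:
--         if part.startswith("#"):
--             hashtags = [tag.lower() for tag in part.split("#") if tag]
--             tags.extend(hashtags)
--         elif "#" in part:
--             hashtags = [tag.lower() for tag in part.split("#")[1:] if tag]
--             tags.extend(hashtags)
--
--     return list(set(tags))
-- ===== SOURCE B (Python) =====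
-- import re
--
-- def extract_tags_from_description(description):
--     """Extract hashtags from description text."""
--     if not description:
--         return []
--     matches = re.findall(r'#([^#\s]+)', description)
--     return list({m.lower() for m in matches})
-- ===== Notes on version B (the rewrite author's own statement) =====
-- stated objective: idiomatic
-- what changed: A splits the text into whitespace tokens and re-splits each token at hash characters with two branch cases; B does one regex scan (re.findall of a hash followed by a maximal run of non-hash non-space characters) over the whole string and dedups the lowercased matches.
import Mathlib
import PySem

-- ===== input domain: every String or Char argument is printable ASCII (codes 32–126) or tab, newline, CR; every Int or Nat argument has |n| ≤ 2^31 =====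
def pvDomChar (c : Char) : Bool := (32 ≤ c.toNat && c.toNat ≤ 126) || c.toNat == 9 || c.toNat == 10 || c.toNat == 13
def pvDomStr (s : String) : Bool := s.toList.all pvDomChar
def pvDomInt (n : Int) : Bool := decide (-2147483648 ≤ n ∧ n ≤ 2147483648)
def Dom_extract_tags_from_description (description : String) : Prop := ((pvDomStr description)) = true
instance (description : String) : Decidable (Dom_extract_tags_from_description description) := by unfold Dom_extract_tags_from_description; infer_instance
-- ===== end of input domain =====

-- B replaces A's word-split plus per-word '#'-split loops with a single left-to-right
-- scan for maximal '#'-prefixed runs (the regex r'#([^#\s]+)'): an alternative one-pass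
-- decomposition of the same extraction; return value only, no argument is mutated.

-- ===== PORT A =====
def extract_tags_from_description (description : String) : List String :=
  if description = "" then []
  else
    let parts := PySem.Str.split₀ description
    let tags := parts.foldl (fun tags part =>
      if PySem.Str.startswith part "#" then
        tags ++ (((PySem.Str.split? part "#").getD []).filter (· != "")).map PySem.Str.lower
      else if PySem.Str.isIn "#" part then
        tags ++ ((((PySem.Str.split? part "#").getD []).drop 1).filter (· != "")).map PySem.Str.lower
      else tags) ([] : List String)
    PySem.Set.ofList tags

-- ===== PORT B =====
-- character class [^#\s] of the regex
def pvIsTagChar (c : Char) : Bool := !(c == '#' || PySem.Chars.isspace c)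

-- re.findall(r'#([^#\s]+)', ·) over the character list: left-to-right scan
def pvScanTags : List Char → List (List Char)
  | [] => []
  | c :: rest =>
    if c = '#' then
      if rest.takeWhile pvIsTagChar = [] then pvScanTags rest
      else rest.takeWhile pvIsTagChar :: pvScanTags (rest.dropWhile pvIsTagChar)
    else pvScanTags rest
termination_by cs => cs.length
decreasing_by
  · simp only [List.length_cons]; omega
  · exact Nat.lt_succ_of_le (List.length_dropWhile_le _ _)
  · simp only [List.length_cons]; omega

def extract_tags_from_description_alt (description : String) : List String :=
  if description = "" then []
  else
    PySem.List.dedup ((pvScanTags description.toList).map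
      (fun m => String.ofList (PySem.Chars.lower m)))

-- ===== PRECONDITION & SPEC =====
def Spec_extract_tags_from_description (description : String) (out : List String) : Prop := out = extract_tags_from_description_alt description
instance (description : String) (out : List String) : Decidable (Spec_extract_tags_from_description description out) := by unfold Spec_extract_tags_from_description; infer_instance

-- ===== CLAIM (what is proved, stated in full; the proofs are below) =====
def Claim_equal_extract_tags_from_description : Prop := ∀ (description : String), Dom_extract_tags_from_description description → Spec_extract_tags_from_description description (extract_tags_from_description description)
-- ===== LEMMAS AND PROOFS =====

-- s.split('#') as a simple structural recursion (proof-side model of PySem.Chars.splitOn · ['#'])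
def pvSplitHash : List Char → List (List Char)
  | [] => [[]]
  | c :: rest =>
    if c = '#' then [] :: pvSplitHash rest
    else
      match pvSplitHash rest with
      | s :: ss => (c :: s) :: ss
      | [] => [[c]]
lemma pvSplitHash_ne_nil (cs : List Char) : pvSplitHash cs ≠ [] := by
  induction cs with
  | nil => simp [pvSplitHash]
  | cons c rest ih =>
    simp only [pvSplitHash]
    split
    · simp
    · cases h : pvSplitHash rest <;> simp

lemma pvSplitHash_headI (cs : List Char) :
    (pvSplitHash cs).headI = cs.takeWhile (· != '#') := by
  induction cs with
  | nil => simp [pvSplitHash]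
  | cons c rest ih =>
    simp only [pvSplitHash]
    split
    · subst ‹c = '#'›; simp [List.takeWhile]
    · cases h : pvSplitHash rest with
      | nil => exact absurd h (pvSplitHash_ne_nil rest)
      | cons s ss =>
        rw [h] at ih
        have hc : (c != '#') = true := by simp [‹¬ c = '#'›]
        simp only [List.headI] at ih ⊢
        simp [List.takeWhile, hc, ih]

lemma pvSplitHash_tail (cs : List Char) :
    (pvSplitHash cs).tail = (pvSplitHash (cs.dropWhile (· != '#'))).tail := by
  induction cs with
  | nil => simp
  | cons c rest ih =>
    simp only [pvSplitHash]
    split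
    · subst ‹c = '#'›
      simp [List.dropWhile, pvSplitHash]
    · cases h : pvSplitHash rest with
      | nil => exact absurd h (pvSplitHash_ne_nil rest)
      | cons s ss =>
        rw [h] at ih
        have hc : (c != '#') = true := by simp [‹¬ c = '#'›]
        simp only [List.tail] at ih ⊢
        simp [List.dropWhile, hc, ih]

lemma pvSplitHash_no_hash (cs : List Char) (h : '#' ∉ cs) : pvSplitHash cs = [cs] := by
  induction cs with
  | nil => simp [pvSplitHash]
  | cons c rest ih =>
    simp only [List.mem_cons, not_or] at h
    simp [pvSplitHash, Ne.symm h.1, ih h.2]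

lemma pv_splitOn_go_spec (l : List Char) : ∀ (fuel : Nat) (cur : List Char)
    (acc : List (List Char)), l.length < fuel →
    PySem.Chars.splitOn.go ['#'] fuel l cur acc
      = acc.reverse ++ (cur.reverse ++ (pvSplitHash l).headI) :: (pvSplitHash l).tail := by
  induction l with
  | nil =>
    intro fuel cur acc hf
    cases fuel with
    | zero => omega
    | succ n => simp [PySem.Chars.splitOn.go, pvSplitHash]
  | cons c rest ih =>
    intro fuel cur acc hf
    cases fuel with
    | zero => omega
    | succ n =>
      simp only [List.length_cons] at hf
      by_cases hc : c = '#'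
      · subst hc
        rw [PySem.Chars.splitOn.go]
        have hpre : (['#'].isPrefixOf ('#' :: rest)) = true := by simp [List.isPrefixOf]
        simp only [hpre, if_true, List.length_singleton, List.drop_succ_cons, List.drop_zero]
        rw [ih n [] (cur.reverse :: acc) (by omega)]
        cases h : pvSplitHash rest with
        | nil => exact absurd h (pvSplitHash_ne_nil rest)
        | cons s ss => simp [pvSplitHash, h]
      · rw [PySem.Chars.splitOn.go]
        have hpre : (['#'].isPrefixOf (c :: rest)) = false := by
          simp [List.isPrefixOf]; exact fun h => hc h.symm
        simp only [hpre, Bool.false_eq_true, if_false]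
        rw [ih n (c :: cur) acc (by omega)]
        cases h : pvSplitHash rest with
        | nil => exact absurd h (pvSplitHash_ne_nil rest)
        | cons s ss => simp [pvSplitHash, h, hc]

lemma pv_splitOn_eq (cs : List Char) : PySem.Chars.splitOn cs ['#'] = pvSplitHash cs := by
  rw [PySem.Chars.splitOn, pv_splitOn_go_spec cs (cs.length + 1) [] [] (by omega)]
  cases h : pvSplitHash cs with
  | nil => exact absurd h (pvSplitHash_ne_nil cs)
  | cons s ss => simp

-- s.split() as a simple recursion (proof-side model of PySem.Chars.split₀)
def pvNonWs (c : Char) : Bool := !PySem.Chars.isspace c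

def pvWords : List Char → List (List Char)
  | [] => []
  | c :: rest =>
    if PySem.Chars.isspace c then pvWords rest
    else (c :: rest.takeWhile pvNonWs) :: pvWords (rest.dropWhile pvNonWs)
termination_by cs => cs.length
decreasing_by
  · simp only [List.length_cons]; omega
  · exact Nat.lt_succ_of_le (List.length_dropWhile_le _ _)
lemma pv_split₀_go_spec (cs : List Char) : ∀ (cur : List Char) (acc : List (List Char)),
    PySem.Chars.split₀.go cs cur acc
      = acc.reverse ++ (if cur.isEmpty then pvWords cs
          else (cur.reverse ++ cs.takeWhile pvNonWs) :: pvWords (cs.dropWhile pvNonWs)) := by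
  induction cs with
  | nil =>
    intro cur acc
    rw [PySem.Chars.split₀.go]
    cases cur <;> simp [pvWords]
  | cons c rest ih =>
    intro cur acc
    rw [PySem.Chars.split₀.go]
    by_cases hs : PySem.Chars.isspace c
    · cases cur with
      | nil => rw [if_pos hs, ih]; simp [pvWords, hs]
      | cons x xs =>
        rw [if_pos hs]
        simp only [List.isEmpty_cons, Bool.false_eq_true, if_false]
        rw [ih]
        simp [pvWords, hs, List.takeWhile, List.dropWhile, pvNonWs]
    · have hnw : pvNonWs c = true := by simp [pvNonWs, hs]
      rw [if_neg hs, ih]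
      cases cur with
      | nil => simp [pvWords, hs]
      | cons x xs => simp [List.takeWhile, List.dropWhile, hnw]

lemma pv_split₀_eq (cs : List Char) : PySem.Chars.split₀ cs = pvWords cs := by
  rw [PySem.Chars.split₀, pv_split₀_go_spec cs [] []]
  simp

lemma pvWords_no_ws (cs : List Char) : ∀ w ∈ pvWords cs, ∀ c ∈ w,
    PySem.Chars.isspace c = false := by
  fun_induction pvWords cs with
  | case1 => simp
  | case2 c rest hs ih => simpa [pvWords, hs] using ih
  | case3 c rest hs ih =>
    intro w hw x hx
    simp only [List.mem_cons] at hw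
    rcases hw with rfl | hw
    · rcases List.mem_cons.mp hx with rfl | hx
      · simpa using hs
      · have := List.mem_takeWhile_imp hx
        simpa [pvNonWs] using this
    · exact ih w hw x hx

lemma pv_takeWhile_tag (cs : List Char) (h : ∀ c ∈ cs, PySem.Chars.isspace c = false) :
    cs.takeWhile pvIsTagChar = cs.takeWhile (· != '#') ∧
    cs.dropWhile pvIsTagChar = cs.dropWhile (· != '#') := by
  induction cs with
  | nil => simp
  | cons c rest ih =>
    have hc : pvIsTagChar c = (c != '#') := by
      simp [pvIsTagChar, h c (by simp), bne]
    have ih' := ih (fun x hx => h x (List.mem_cons_of_mem _ hx))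
    by_cases hh : c = '#'
    · subst hh; simp [List.takeWhile, List.dropWhile, hc]
    · have : (c != '#') = true := by simp [hh]
      simp [List.takeWhile, List.dropWhile, hc, this, ih'.1, ih'.2]

lemma pv_scan_eq_split (cs : List Char) (h : ∀ c ∈ cs, PySem.Chars.isspace c = false) :
    pvScanTags cs = ((pvSplitHash cs).tail).filter (· != []) := by
  fun_induction pvScanTags cs with
  | case1 => simp [pvSplitHash]
  | case2 rest htag ih =>
    have hrest : ∀ x ∈ rest, PySem.Chars.isspace x = false :=
      fun x hx => h x (List.mem_cons_of_mem _ hx)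
    rw [ih hrest]
    rw [show pvSplitHash ('#' :: rest) = [] :: pvSplitHash rest from by simp [pvSplitHash],
      List.tail_cons]
    cases hsp : pvSplitHash rest with
    | nil => exact absurd hsp (pvSplitHash_ne_nil rest)
    | cons s ss =>
      have hhead : s = rest.takeWhile (· != '#') := by
        have := pvSplitHash_headI rest; rw [hsp] at this; simpa using this
      have hs0 : s = [] := by
        rw [hhead, ← (pv_takeWhile_tag rest hrest).1, htag]
      subst hs0
      simp
  | case3 rest htag ih =>
    have hrest : ∀ x ∈ rest, PySem.Chars.isspace x = false :=
      fun x hx => h x (List.mem_cons_of_mem _ hx)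
    have hdw : ∀ x ∈ rest.dropWhile pvIsTagChar, PySem.Chars.isspace x = false :=
      fun x hx => hrest x ((List.dropWhile_sublist _).mem hx)
    rw [ih hdw]
    rw [show pvSplitHash ('#' :: rest) = [] :: pvSplitHash rest from by simp [pvSplitHash],
      List.tail_cons]
    cases hsp : pvSplitHash rest with
    | nil => exact absurd hsp (pvSplitHash_ne_nil rest)
    | cons s ss =>
      have hhead : s = rest.takeWhile (· != '#') := by
        have := pvSplitHash_headI rest; rw [hsp] at this; simpa using this
      have htw := (pv_takeWhile_tag rest hrest).1
      have hdw' := (pv_takeWhile_tag rest hrest).2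
      have hsne : (s != []) = true := by
        simp only [bne_iff_ne, ne_eq]
        rw [hhead, ← htw]; exact htag
      have hss : ss = (pvSplitHash (rest.dropWhile pvIsTagChar)).tail := by
        have := pvSplitHash_tail rest
        rw [hsp] at this
        simpa [hdw'] using this
      rw [List.filter_cons, if_pos hsne, hhead, ← htw, hss]
  | case4 c rest hc ih =>
    have hrest : ∀ x ∈ rest, PySem.Chars.isspace x = false :=
      fun x hx => h x (List.mem_cons_of_mem _ hx)
    rw [ih hrest]
    simp only [pvSplitHash]
    rw [if_neg hc]
    cases hsp : pvSplitHash rest with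
    | nil => exact absurd hsp (pvSplitHash_ne_nil rest)
    | cons s ss => simp

lemma pvScanTags_cons (c : Char) (rest : List Char) :
    pvScanTags (c :: rest)
      = if c = '#' then
          (if rest.takeWhile pvIsTagChar = [] then pvScanTags rest
           else rest.takeWhile pvIsTagChar :: pvScanTags (rest.dropWhile pvIsTagChar))
        else pvScanTags rest := by
  rw [pvScanTags]

lemma pv_scan_append (d : Char) (hd : PySem.Chars.isspace d = true) (xs ds : List Char) :
    pvScanTags (xs ++ d :: ds) = pvScanTags xs ++ pvScanTags (d :: ds) := by
  have hpd : pvIsTagChar d = false := by simp [pvIsTagChar, hd]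
  fun_induction pvScanTags xs with
  | case1 => simp
  | case2 rest htag ih =>
    have htagL : (rest ++ d :: ds).takeWhile pvIsTagChar = [] := by
      rw [List.takeWhile_append]
      split
      · next hlen =>
        have h1 : rest.takeWhile pvIsTagChar = rest :=
          (List.takeWhile_prefix _).eq_of_length hlen
        rw [htag] at h1
        rw [← h1]
        simp [List.takeWhile, hpd]
      · exact htag
    rw [List.cons_append, pvScanTags_cons '#' (rest ++ d :: ds), if_pos rfl, if_pos htagL, ih]
  | case3 rest htag ih =>
    show pvScanTags ('#' :: (rest ++ d :: ds)) = _
    by_cases hall : rest.takeWhile pvIsTagChar = rest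
    · have hrne : rest ≠ [] := fun h => htag (by rw [h] at hall ⊢; exact hall)
      have hdrop : rest.dropWhile pvIsTagChar = [] := by
        have := List.takeWhile_append_dropWhile (p := pvIsTagChar) (l := rest)
        rw [hall] at this
        simpa using this
      have htagL : (rest ++ d :: ds).takeWhile pvIsTagChar = rest := by
        rw [List.takeWhile_append, if_pos (by rw [hall])]
        simp [List.takeWhile, hpd]
      have hdropL : (rest ++ d :: ds).dropWhile pvIsTagChar = d :: ds := by
        rw [List.dropWhile_append, if_pos (by simp [hdrop])]
        simp [List.dropWhile, hpd]
      rw [List.cons_append, pvScanTags_cons '#' (rest ++ d :: ds), if_pos rfl, htagL, if_neg hrne, hdropL,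
        hall, hdrop]
      simp [pvScanTags]
    · have hlen : ¬ ((rest.takeWhile pvIsTagChar).length = rest.length) := by
        intro hlen
        exact hall ((List.takeWhile_prefix _).eq_of_length hlen)
      have hdropne : rest.dropWhile pvIsTagChar ≠ [] := by
        intro h
        apply hall
        have := List.takeWhile_append_dropWhile (p := pvIsTagChar) (l := rest)
        rw [h] at this
        simpa using this
      have htagL : (rest ++ d :: ds).takeWhile pvIsTagChar = rest.takeWhile pvIsTagChar := by
        rw [List.takeWhile_append, if_neg hlen]
      have hdropL : (rest ++ d :: ds).dropWhile pvIsTagChar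
          = rest.dropWhile pvIsTagChar ++ d :: ds := by
        rw [List.dropWhile_append, if_neg (by simpa using hdropne)]
      rw [List.cons_append, pvScanTags_cons '#' (rest ++ d :: ds), if_pos rfl, htagL, if_neg htag, hdropL, ih]
  | case4 c rest hc ih =>
    rw [List.cons_append, pvScanTags_cons c (rest ++ d :: ds), if_neg hc, ih]

lemma pv_scan_flat (cs : List Char) : pvScanTags cs = (pvWords cs).flatMap pvScanTags := by
  fun_induction pvWords cs with
  | case1 => simp [pvScanTags]
  | case2 c rest hs ih =>
    have hc : ¬ c = '#' := by
      intro h; subst h; exact absurd hs (by decide)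
    rw [pvScanTags_cons c rest, if_neg hc, ih]
  | case3 c rest hs ih =>
    have hsplit : c :: rest = (c :: rest.takeWhile pvNonWs) ++ rest.dropWhile pvNonWs := by
      simp [List.takeWhile_append_dropWhile]
    rw [List.flatMap_cons, ← ih]
    cases hdw : rest.dropWhile pvNonWs with
    | nil =>
      rw [hdw] at hsplit
      simp only [List.append_nil] at hsplit
      rw [← hsplit]
      simp [pvScanTags]
    | cons e es =>
      have he : PySem.Chars.isspace e = true := by
        have h1 := List.head_dropWhile_not pvNonWs (l := rest) (by simp [hdw])
        have h2 : (List.dropWhile pvNonWs rest).head (by simp [hdw]) = e := by simp [hdw]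
        rw [h2] at h1
        simpa [pvNonWs] using h1
      calc pvScanTags (c :: rest)
          = pvScanTags ((c :: rest.takeWhile pvNonWs) ++ e :: es) := by rw [← hdw, ← hsplit]
        _ = pvScanTags (c :: rest.takeWhile pvNonWs) ++ pvScanTags (e :: es) :=
            pv_scan_append e he _ es
        _ = _ := rfl

-- A's per-word contribution
def pvContrib (part : String) : List String :=
  if PySem.Str.startswith part "#" then
    (((PySem.Str.split? part "#").getD []).filter (· != "")).map PySem.Str.lower
  else if PySem.Str.isIn "#" part then
    ((((PySem.Str.split? part "#").getD []).drop 1).filter (· != "")).map PySem.Str.lower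
  else []

def pvLow (m : List Char) : String := String.ofList (PySem.Chars.lower m)

lemma pv_split?_ofList (w : List Char) :
    (PySem.Str.split? (String.ofList w) "#").getD [] = (pvSplitHash w).map String.ofList := by
  rw [PySem.Str.split?]
  simp [PySem.Chars.split?, String.toList_ofList, show ("#" : String).toList = ['#'] from rfl,
    pv_splitOn_eq]

lemma pv_filter_map_ofList (l : List (List Char)) :
    (l.map String.ofList).filter (· != "") = (l.filter (· != [])).map String.ofList := by
  rw [List.filter_map]
  congr 1
  apply List.filter_congr
  intro s _
  show (String.ofList s != "") = (s != [])
  rcases eq_or_ne s [] with rfl | h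
  · simp
  · have hne : String.ofList s ≠ "" := by
      intro hh
      exact h (by simpa using congrArg String.toList hh)
    rw [Bool.eq_iff_iff]
    simp [bne_iff_ne, hne, h]

lemma pv_map_lower_ofList (l : List (List Char)) :
    (l.map String.ofList).map PySem.Str.lower = l.map pvLow := by
  rw [List.map_map]
  apply List.map_congr_left
  intro s _
  show PySem.Str.lower (String.ofList s) = pvLow s
  rw [PySem.Str.lower, String.toList_ofList, pvLow]

lemma pv_word_contrib (w : List Char) (hw : ∀ c ∈ w, PySem.Chars.isspace c = false) :
    pvContrib (String.ofList w) = (pvScanTags w).map pvLow := by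
  rw [pvContrib, pv_scan_eq_split w hw]
  by_cases h1 : PySem.Str.startswith (String.ofList w) "#"
  · rw [if_pos h1, pv_split?_ofList, pv_filter_map_ofList, pv_map_lower_ofList]
    obtain ⟨r, rfl⟩ : ∃ r, w = '#' :: r := by
      rw [PySem.Str.startswith, String.toList_ofList,
        show ("#" : String).toList = ['#'] from rfl] at h1
      cases w with
      | nil => simp [PySem.Chars.startswith, List.isPrefixOf] at h1
      | cons c r =>
        have hc : '#' = c := by
          simpa [PySem.Chars.startswith, List.isPrefixOf] using h1
        exact ⟨r, by rw [← hc]⟩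
    rw [show pvSplitHash ('#' :: r) = [] :: pvSplitHash r from by simp [pvSplitHash],
      List.tail_cons, List.filter_cons]
    simp
  · rw [if_neg h1]
    by_cases h2 : PySem.Str.isIn "#" (String.ofList w)
    · rw [if_pos h2, pv_split?_ofList, ← List.map_drop, List.drop_one, pv_filter_map_ofList,
        pv_map_lower_ofList]
    · rw [if_neg h2]
      have hnh : '#' ∉ w := by
        intro hmem
        rw [PySem.Str.isIn] at h2
        simp only [String.toList_ofList, show ("#" : String).toList = ['#'] from rfl] at h2
        rw [Bool.not_eq_true, PySem.Chars.isIn_eq_false_iff] at h2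
        obtain ⟨s, t, rfl⟩ := List.append_of_mem hmem
        exact h2 ⟨s, t, by simp⟩
      rw [pvSplitHash_no_hash w hnh]
      simp

theorem pv_main (description : String) :
    extract_tags_from_description description = extract_tags_from_description_alt description := by
  rw [extract_tags_from_description, extract_tags_from_description_alt]
  by_cases h0 : description = ""
  · rw [if_pos h0, if_pos h0]
  · rw [if_neg h0, if_neg h0, PySem.List.dedup_eq_ofList]
    show PySem.Set.ofList ((PySem.Str.split₀ description).foldl (fun tags part =>
        if PySem.Str.startswith part "#" then
          tags ++ (((PySem.Str.split? part "#").getD []).filter (· != "")).map PySem.Str.lower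
        else if PySem.Str.isIn "#" part then
          tags ++ ((((PySem.Str.split? part "#").getD []).drop 1).filter (· != "")).map PySem.Str.lower
        else tags) ([] : List String)) = _
    congr 1
    have hbody : (fun (tags : List String) part =>
        if PySem.Str.startswith part "#" then
          tags ++ (((PySem.Str.split? part "#").getD []).filter (· != "")).map PySem.Str.lower
        else if PySem.Str.isIn "#" part then
          tags ++ ((((PySem.Str.split? part "#").getD []).drop 1).filter (· != "")).map PySem.Str.lower
        else tags)
        = fun (tags : List String) part => tags ++ pvContrib part := by
      funext tags part
      rw [pvContrib]
      split_ifs <;> simp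
    rw [hbody, PySem.List.foldl_append_eq_flatMap, List.nil_append]
    rw [PySem.Str.split₀, pv_split₀_eq, List.flatMap_map]
    rw [pv_scan_flat description.toList, List.map_flatMap]
    apply List.flatMap_congr
    intro w hw
    exact pv_word_contrib w (pvWords_no_ws description.toList w hw)

-- ===== VERDICT (by name: the statement is the Claim_ definition above) =====
theorem extract_tags_from_description_spec : Claim_equal_extract_tags_from_description := by
  intro description _
  unfold Spec_extract_tags_from_description
  exact pv_main description
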